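-- pv_equiv track=rewrite | github.com/StephanBischoff-Digle/adventofcode | 2022/16/Python/proto1.py | compute_flow
-- ===== SOURCE A (Python) =====
-- Matrix = list[list[int]]
--
-- def compute_flow(path: list[int], rates: list[int], m: Matrix, hi: int = 30) -> int:
--     t = 0
--     cf = 0
--     cn = 0
--     total = 0
--     for i in path:
--         dt = m[cn][i]
--         cn = i
--         total += dt * cf
--         cf += rates[i]
--         t += dt
--     total += (hi - t) * cf
--     return total
-- ===== SOURCE B (Python) =====
-- def compute_flow(path: list[int], rates: list[int], m: list[list[int]], hi: int = 30) -> int: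
--     # Staged passes: edge costs along the path, then prefix-sum arrival times,
--     # then one weighted sum of each valve's remaining minutes.
--     dts = [m[a][b] for a, b in zip([0] + path, path)]
--     times = []
--     t = 0
--     for dt in dts:
--         t += dt
--         times.append(t)
--     return sum(rates[i] * (hi - t) for i, t in zip(path, times))
-- ===== Notes on version B (the rewrite author's own statement) =====
-- stated objective: alternative
-- what changed: B replaces A's single stateful loop (running flow cf, segment areas dt*cf, trailing (hi-t)*cf correction) by three staged passes: a list of edge costs, their prefix-sum arrival times, and one weighted sum of rates[i]*(hi-t) per opened valve; it trades the on-line accumulator for the reassociated per-valve contribution sum.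
import Mathlib
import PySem

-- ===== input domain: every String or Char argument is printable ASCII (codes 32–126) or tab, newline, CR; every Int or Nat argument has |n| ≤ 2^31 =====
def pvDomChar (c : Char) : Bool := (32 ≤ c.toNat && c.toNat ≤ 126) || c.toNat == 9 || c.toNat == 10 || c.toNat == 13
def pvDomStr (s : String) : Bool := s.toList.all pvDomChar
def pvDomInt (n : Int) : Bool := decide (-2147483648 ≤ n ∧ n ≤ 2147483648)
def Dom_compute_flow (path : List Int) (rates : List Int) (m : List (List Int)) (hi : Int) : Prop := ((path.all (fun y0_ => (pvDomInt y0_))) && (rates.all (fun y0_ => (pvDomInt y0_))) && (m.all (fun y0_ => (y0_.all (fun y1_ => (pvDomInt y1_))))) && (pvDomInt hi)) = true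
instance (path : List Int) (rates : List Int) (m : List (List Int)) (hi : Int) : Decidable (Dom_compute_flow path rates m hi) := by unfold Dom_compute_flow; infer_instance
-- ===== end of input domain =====

-- B replaces A's stateful running-flow loop with a final correction term by three staged
-- passes (edge costs, prefix-sum arrival times, weighted sum of per-valve contributions);
-- objective: alternative decomposition, same cost.

-- ===== PORT A =====
-- single loop over path with state (t, cf, cn, total), exactly A's code
def compute_flow (path : List Int) (rates : List Int) (m : List (List Int)) (hi : Int) : Int :=
  let s := path.foldl
    (fun (st : Int × Int × Int × Int) i =>
      let dt := PySem.List.pyGetD (PySem.List.pyGetD m st.2.2.1 []) i 0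
      (st.1 + dt, st.2.1 + PySem.List.pyGetD rates i 0, i, st.2.2.2 + dt * st.2.1))
    (0, 0, 0, 0)
  s.2.2.2 + (hi - s.1) * s.2.1

-- ===== PORT B =====
-- staged passes: edge-cost list, prefix-sum arrival times, weighted sum
def compute_flow_alt (path : List Int) (rates : List Int) (m : List (List Int)) (hi : Int) : Int :=
  let dts := ((0 :: path).zip path).map
    (fun p => PySem.List.pyGetD (PySem.List.pyGetD m p.1 []) p.2 0)
  let times := (dts.foldl
    (fun (st : Int × List Int) dt => (st.1 + dt, st.2 ++ [st.1 + dt])) (0, ([] : List Int))).2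
  ((path.zip times).map (fun p => PySem.List.pyGetD rates p.1 0 * (hi - p.2))).sum

-- ===== PRECONDITION & SPEC =====
-- Bool check that the matrix lookup m[p.1][p.2] succeeds in Python
def pvStepOk (m : List (List Int)) (p : Int × Int) : Bool :=
  match PySem.List.pyGet? m p.1 with
  | some row => decide (PySem.Raise.InRange row.length p.2)
  | none => false

-- Pre_ admits exactly the inputs where Python A raises no IndexError: every
-- rates[i] lookup is in range and every consecutive matrix lookup m[cn][i]
-- (cn running through 0 :: path) succeeds.
def Pre_compute_flow (path : List Int) (rates : List Int) (m : List (List Int)) (hi : Int) : Prop :=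
  (∀ i ∈ path, PySem.Raise.InRange rates.length i) ∧
  (∀ p ∈ (0 :: path).zip path, pvStepOk m p = true)
instance (path : List Int) (rates : List Int) (m : List (List Int)) (hi : Int) : Decidable (Pre_compute_flow path rates m hi) := by unfold Pre_compute_flow; infer_instance

def pvWitness_compute_flow : List Int × List Int × List (List Int) × Int :=
  ([1, 0], [3, 5], [[0, 2], [4, 0]], 30)

def Spec_compute_flow (path : List Int) (rates : List Int) (m : List (List Int)) (hi : Int) (out : Int) : Prop := out = compute_flow_alt path rates m hi
instance (path : List Int) (rates : List Int) (m : List (List Int)) (hi : Int) (out : Int) : Decidable (Spec_compute_flow path rates m hi out) := by unfold Spec_compute_flow; infer_instance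

-- ===== CLAIM (what is proved, stated in full; the proofs are below) =====
def Claim_equal_compute_flow : Prop := ∀ (path : List Int) (rates : List Int) (m : List (List Int)) (hi : Int), Dom_compute_flow path rates m hi → Pre_compute_flow path rates m hi → Spec_compute_flow path rates m hi (compute_flow path rates m hi)

-- ===== LEMMAS AND PROOFS =====

-- proof-side abbreviation for the matrix lookup
def pvD (m : List (List Int)) (cn i : Int) : Int :=
  PySem.List.pyGetD (PySem.List.pyGetD m cn []) i 0

-- A's loop step and output, definitionally equal to the port's foldl
def pvStepA (rates : List Int) (m : List (List Int)) (st : Int × Int × Int × Int) (i : Int) :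
    Int × Int × Int × Int :=
  (st.1 + pvD m st.2.2.1 i, st.2.1 + PySem.List.pyGetD rates i 0, i, st.2.2.2 + pvD m st.2.2.1 i * st.2.1)

def pvOutA (rates : List Int) (m : List (List Int)) (hi : Int) (path : List Int)
    (st : Int × Int × Int × Int) : Int :=
  let s := path.foldl (pvStepA rates m) st
  s.2.2.2 + (hi - s.1) * s.2.1

-- prefix sums of a list starting from t
def pvTimes : List Int → Int → List Int
  | [], _ => []
  | d :: ds, t => (t + d) :: pvTimes ds (t + d)

-- common spec: sum over the path of rate * minutes remaining after opening
def pvSum (rates : List Int) (m : List (List Int)) (hi : Int) : List Int → Int → Int → Int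
  | [], _, _ => 0
  | i :: rest, cn, t =>
    PySem.List.pyGetD rates i 0 * (hi - (t + pvD m cn i)) + pvSum rates m hi rest i (t + pvD m cn i)

lemma pvOutA_cons (rates : List Int) (m : List (List Int)) (hi i : Int) (rest : List Int)
    (st : Int × Int × Int × Int) :
    pvOutA rates m hi (i :: rest) st = pvOutA rates m hi rest (pvStepA rates m st i) := rfl

lemma pvA_eq (rates : List Int) (m : List (List Int)) (hi : Int) :
    ∀ (path : List Int) (t cf cn total : Int),
      pvOutA rates m hi path (t, cf, cn, total) =
        total + (hi - t) * cf + pvSum rates m hi path cn t := by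
  intro path
  induction path with
  | nil => intro t cf cn total; simp [pvOutA, pvSum]
  | cons i rest ih =>
    intro t cf cn total
    rw [pvOutA_cons]
    show pvOutA rates m hi rest
        (t + pvD m cn i, cf + PySem.List.pyGetD rates i 0, i, total + pvD m cn i * cf) = _
    rw [ih]
    simp only [pvSum]
    ring

lemma pvTimes_fold :
    ∀ (dts : List Int) (t : Int) (pref : List Int),
      (dts.foldl (fun (st : Int × List Int) dt => (st.1 + dt, st.2 ++ [st.1 + dt]))
        (t, pref)).2 = pref ++ pvTimes dts t := by
  intro dts
  induction dts with
  | nil => intro t pref; simp [pvTimes]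
  | cons d ds ih =>
    intro t pref
    simp only [List.foldl_cons, pvTimes]
    rw [ih]
    simp

lemma pvB_eq (rates : List Int) (m : List (List Int)) (hi : Int) :
    ∀ (path : List Int) (cn t : Int),
      ((path.zip (pvTimes (((cn :: path).zip path).map
          (fun p => PySem.List.pyGetD (PySem.List.pyGetD m p.1 []) p.2 0)) t)).map
        (fun p => PySem.List.pyGetD rates p.1 0 * (hi - p.2))).sum =
      pvSum rates m hi path cn t := by
  intro path
  induction path with
  | nil => intro cn t; simp [pvSum]
  | cons i rest ih =>
    intro cn t
    simp only [List.zip_cons_cons, List.map_cons, pvTimes, pvSum, List.sum_cons]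
    rw [ih]
    simp [pvD]

-- ===== VERDICT (by name: the statement is the Claim_ definition above) =====
theorem compute_flow_spec : Claim_equal_compute_flow := by
  intro path rates m hi _ _
  show compute_flow path rates m hi = compute_flow_alt path rates m hi
  have hA : compute_flow path rates m hi = pvOutA rates m hi path (0, 0, 0, 0) := rfl
  have hB : compute_flow_alt path rates m hi =
      ((path.zip ((((0 :: path).zip path).map
          (fun p => PySem.List.pyGetD (PySem.List.pyGetD m p.1 []) p.2 0)).foldl
          (fun (st : Int × List Int) dt => (st.1 + dt, st.2 ++ [st.1 + dt]))
          (0, ([] : List Int))).2).map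
        (fun p => PySem.List.pyGetD rates p.1 0 * (hi - p.2))).sum := rfl
  rw [hA, hB, pvA_eq, pvTimes_fold, List.nil_append, pvB_eq]
  ring
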